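-- pv_equiv track=rewrite | github.com/RyanForrestDUT/PythonPractise | PrintCalendar_weekday.py | get_total_num_of_days
-- ===== SOURCE A (Python) =====
-- def is_leap_year(year):
-- 	if (year %4 == 0 and year %100 != 0) or (year % 400 == 0):
-- 		return True
-- 	else:
-- 		return False
--
-- def get_num_of_days_in_month(year, month):
-- 	if month in (1,3,5,7,8,10,12):
-- 		return 31
-- 	elif month in (4,6,9,11):
-- 		return 30
-- 	elif is_leap_year(year):
-- 		return 29
-- 	else:
-- 		return 28
--
-- def get_total_num_of_days(year,month,day):
-- 	days = 0
-- 	# 计算截止当年总共多少天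
-- 	for y in range(1800,year):
-- 		if is_leap_year(y):
-- 			days += 366
-- 		else:
-- 			days += 365
--
-- 	# 计算截止当年的当月多少天
-- 	for m in range(1,month):
-- 		days += get_num_of_days_in_month(year,m)
--
-- 	# 计算截止当天
-- 	days += day
--
-- 	return days
-- ===== SOURCE B (Python) =====
-- # Closed-form count for the years (no per-year loop); the months are summed directly.
--
-- def _leaps(n):
--     # leap years k with 1 <= k <= n
--     return n // 4 - n // 100 + n // 400
--
-- def _month_len(year, m):
--     if m in (4, 6, 9, 11):
--         return 30
--     if m in (1, 3, 5, 7, 8, 10, 12):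
--         return 31
--     if (year % 4 == 0 and year % 100 != 0) or year % 400 == 0:
--         return 29
--     return 28
--
-- def get_total_num_of_days(year, month, day):
--     days = day
--     if year > 1800:
--         days += 365 * (year - 1800) + _leaps(year - 1) - _leaps(1799)
--     days += sum(_month_len(year, m) for m in range(1, month))
--     return days
-- ===== Notes on version B (the rewrite author's own statement) =====
-- stated objective: alternative
-- what changed: Replaces A's loop over every year since 1800 by a closed form (365 per year plus floor-division leap-year counts) and the month accumulator loop by a sum over a month-length helper; intended as faster in the year, but a timing run (which grows the month) measured only ~1.5x, so no speed is claimed.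
import Mathlib
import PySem

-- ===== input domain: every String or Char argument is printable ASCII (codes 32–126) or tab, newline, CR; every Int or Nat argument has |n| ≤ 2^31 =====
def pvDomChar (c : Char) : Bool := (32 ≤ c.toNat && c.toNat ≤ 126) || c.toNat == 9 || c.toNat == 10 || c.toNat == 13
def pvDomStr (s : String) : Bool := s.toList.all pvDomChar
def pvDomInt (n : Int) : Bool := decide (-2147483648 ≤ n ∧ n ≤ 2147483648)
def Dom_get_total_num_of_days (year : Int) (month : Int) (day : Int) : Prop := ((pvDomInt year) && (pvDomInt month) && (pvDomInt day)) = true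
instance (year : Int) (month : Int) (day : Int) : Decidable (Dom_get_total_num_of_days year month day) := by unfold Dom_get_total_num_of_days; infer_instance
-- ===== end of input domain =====

-- B replaces A's loop over every year since 1800 by a closed-form leap-year count (alternative algorithm; O(month) instead of O(year+month)).

-- ===== PORT A =====
def is_leap_year (year : Int) : Bool :=
  (PySem.Int.mod year 4 == 0 && !(PySem.Int.mod year 100 == 0)) || PySem.Int.mod year 400 == 0

def get_num_of_days_in_month (year : Int) (month : Int) : Int :=
  if ([1, 3, 5, 7, 8, 10, 12] : List Int).contains month then 31
  else if ([4, 6, 9, 11] : List Int).contains month then 30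
  else if is_leap_year year then 29
  else 28

def get_total_num_of_days (year : Int) (month : Int) (day : Int) : Int :=
  let days : Int := 0
  let days := (PySem.List.pyRange 1800 year 1).foldl
    (fun d y => if is_leap_year y then d + 366 else d + 365) days
  let days := (PySem.List.pyRange 1 month 1).foldl
    (fun d m => d + get_num_of_days_in_month year m) days
  days + day

-- ===== PORT B =====
def altLeaps (n : Int) : Int :=
  PySem.Int.floordiv n 4 - PySem.Int.floordiv n 100 + PySem.Int.floordiv n 400

def altMonthLen (year : Int) (m : Int) : Int :=
  if ([4, 6, 9, 11] : List Int).contains m then 30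
  else if ([1, 3, 5, 7, 8, 10, 12] : List Int).contains m then 31
  else if (PySem.Int.mod year 4 == 0 && !(PySem.Int.mod year 100 == 0)) || PySem.Int.mod year 400 == 0 then 29
  else 28

def get_total_num_of_days_alt (year : Int) (month : Int) (day : Int) : Int :=
  let days := day
  let days := if year > 1800
    then days + 365 * (year - 1800) + altLeaps (year - 1) - altLeaps 1799
    else days
  -- sum(...) over the generator is Python's left fold with start 0
  days + (PySem.List.pyRange 1 month 1).foldl (fun acc m => acc + altMonthLen year m) 0

-- ===== PRECONDITION & SPEC =====
def Spec_get_total_num_of_days (year : Int) (month : Int) (day : Int) (out : Int) : Prop := out = get_total_num_of_days_alt year month day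
instance (year : Int) (month : Int) (day : Int) (out : Int) : Decidable (Spec_get_total_num_of_days year month day out) := by unfold Spec_get_total_num_of_days; infer_instance

-- ===== CLAIM =====
def Claim_equal_get_total_num_of_days : Prop := ∀ (year : Int) (month : Int) (day : Int), Dom_get_total_num_of_days year month day → Spec_get_total_num_of_days year month day (get_total_num_of_days year month day)

-- ===== LEMMAS AND PROOFS =====

-- one leap-year step of the counting formula
theorem altLeaps_step (n : Int) :
    altLeaps n - altLeaps (n - 1) = (if is_leap_year n then 1 else 0) := by
  have h4 := PySem.Int.floordiv_eq_ediv_of_pos (a := n) (b := 4) (by norm_num)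
  have h100 := PySem.Int.floordiv_eq_ediv_of_pos (a := n) (b := 100) (by norm_num)
  have h400 := PySem.Int.floordiv_eq_ediv_of_pos (a := n) (b := 400) (by norm_num)
  have h4' := PySem.Int.floordiv_eq_ediv_of_pos (a := n - 1) (b := 4) (by norm_num)
  have h100' := PySem.Int.floordiv_eq_ediv_of_pos (a := n - 1) (b := 100) (by norm_num)
  have h400' := PySem.Int.floordiv_eq_ediv_of_pos (a := n - 1) (b := 400) (by norm_num)
  have m4 := PySem.Int.mod_eq_emod_of_pos (a := n) (b := 4) (by norm_num)
  have m100 := PySem.Int.mod_eq_emod_of_pos (a := n) (b := 100) (by norm_num)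
  have m400 := PySem.Int.mod_eq_emod_of_pos (a := n) (b := 400) (by norm_num)
  simp only [altLeaps, is_leap_year, h4, h100, h400, h4', h100', h400', m4, m100, m400]
  split_ifs with h
  · simp only [Bool.or_eq_true, Bool.and_eq_true, Bool.not_eq_eq_eq_not, Bool.not_true,
      beq_iff_eq, beq_eq_false_iff_ne, ne_eq] at h
    omega
  · simp only [Bool.or_eq_true, Bool.and_eq_true, Bool.not_eq_eq_eq_not, Bool.not_true,
      beq_iff_eq, beq_eq_false_iff_ne, ne_eq, not_or, not_and] at h
    omega

-- the closed form for A's year loop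
theorem yearLoop_aux (k : Nat) : ∀ (y : Int), y - 1800 = k →
    (PySem.List.pyRange 1800 y 1).foldl
      (fun d z => if is_leap_year z then d + 366 else d + 365) 0
    = (if y > 1800 then 365 * (y - 1800) + altLeaps (y - 1) - altLeaps 1799 else 0) := by
  induction k with
  | zero =>
    intro y hy
    rw [PySem.List.pyRange_one_eq_nil (by omega)]
    simp only [List.foldl_nil]
    rw [if_neg (by omega)]
  | succ k ih =>
    intro y hy
    have hs := PySem.List.pyRange_one_singleton (a := y - 1)
    rw [show y - 1 + 1 = y by ring] at hs
    rw [PySem.List.pyRange_one_append 1800 (y - 1) y (by omega) (by omega), hs,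
      List.foldl_append, ih (y - 1) (by omega)]
    simp only [List.foldl_cons, List.foldl_nil]
    by_cases hy' : y = 1801
    · subst hy'
      have hstep := altLeaps_step 1800
      norm_num at hstep ⊢
      split_ifs at hstep ⊢ <;> linarith
    · have h1 : (1800 : Int) < y - 1 := by omega
      have hstep := altLeaps_step (y - 1)
      rw [if_pos h1, if_pos (show y > 1800 by omega)]
      split_ifs at hstep ⊢ <;> linarith

theorem yearLoop (y : Int) :
    (PySem.List.pyRange 1800 y 1).foldl
      (fun d z => if is_leap_year z then d + 366 else d + 365) 0
    = (if y > 1800 then 365 * (y - 1800) + altLeaps (y - 1) - altLeaps 1799 else 0) := by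
  by_cases h : 1800 < y
  · exact yearLoop_aux (y - 1800).toNat y (by omega)
  · rw [PySem.List.pyRange_one_eq_nil (by omega)]
    simp only [List.foldl_nil]
    rw [if_neg (by omega)]

-- the two month-length helpers agree (branch order differs, values do not)
theorem monthLen_eq (year m : Int) :
    get_num_of_days_in_month year m = altMonthLen year m := by
  unfold get_num_of_days_in_month altMonthLen is_leap_year
  by_cases h31 : ([1, 3, 5, 7, 8, 10, 12] : List Int).contains m = true <;>
  by_cases h30 : ([4, 6, 9, 11] : List Int).contains m = true <;>
    simp_all [List.contains_eq_mem] <;> omega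

-- ===== VERDICT =====
theorem get_total_num_of_days_spec : Claim_equal_get_total_num_of_days := by
  intro year month day _
  unfold Spec_get_total_num_of_days get_total_num_of_days get_total_num_of_days_alt
  dsimp only
  rw [PySem.List.foldl_add (g := get_num_of_days_in_month year),
    PySem.List.foldl_add (g := altMonthLen year), yearLoop]
  have hmap : (PySem.List.pyRange 1 month 1).map (get_num_of_days_in_month year)
      = (PySem.List.pyRange 1 month 1).map (altMonthLen year) :=
    List.map_congr_left (fun m _ => monthLen_eq year m)
  rw [hmap]
  split_ifs <;> ring
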